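-- pv_equiv track=rewrite | github.com/jarrydjames/Perrypicksv4 | _quarantine/2026-02-28_cleanup/unused_code/bet_resolver_improved.py | resolve_parlay_from_legs
-- ===== SOURCE A (Python) =====
-- from typing import List, Optional, Tuple
--
-- def resolve_parlay_from_legs(leg_results: List[str]) -> str:
--     """
--     Resolve a parlay based on leg results.
--
--     Rules:
--     - Parlay WINS if ALL legs win
--     - Parlay LOSES if ANY leg loses
--     - Parlay PUSHES if no losses and at least one push
--     """
--     if not leg_results:
--         return "lost"
--
--     has_loss = "lost" in leg_results
--     has_push = "push" in leg_results
--     all_won = all(r == "won" for r in leg_results)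
--
--     if has_loss:
--         return "lost"
--     elif all_won:
--         return "won"
--     elif has_push:
--         return "push"
--     else:
--         return "lost"
-- ===== SOURCE B (Python) =====
-- def resolve_parlay_from_legs(leg_results):
--     if not leg_results:
--         return "lost"
--     saw_push = False
--     all_won = True
--     for r in leg_results:
--         if r == "lost":
--             return "lost"
--         if r == "push":
--             saw_push = True
--         if r != "won":
--             all_won = False
--     if all_won:
--         return "won"
--     if saw_push:
--         return "push"
--     return "lost"
-- ===== Notes on version B (the rewrite author's own statement) =====
-- stated objective: alternative
-- what changed: Replaced A's three separate scans (membership test for 'lost', membership test for 'push', all()-scan for 'won') by one explicit single-pass loop maintaining saw_push/all_won that returns 'lost' the moment a losing leg is seen.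
import Mathlib
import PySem

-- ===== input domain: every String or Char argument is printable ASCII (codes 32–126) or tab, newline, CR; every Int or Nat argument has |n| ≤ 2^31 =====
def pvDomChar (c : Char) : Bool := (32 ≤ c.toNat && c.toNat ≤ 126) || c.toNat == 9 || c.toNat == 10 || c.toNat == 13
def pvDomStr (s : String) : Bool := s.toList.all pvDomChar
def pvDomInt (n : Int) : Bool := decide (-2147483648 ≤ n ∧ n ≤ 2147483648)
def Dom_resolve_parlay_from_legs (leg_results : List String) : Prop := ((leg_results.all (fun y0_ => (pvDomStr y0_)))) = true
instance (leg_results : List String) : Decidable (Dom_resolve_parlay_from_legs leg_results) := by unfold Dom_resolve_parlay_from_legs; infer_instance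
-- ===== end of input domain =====

-- B replaces A's three separate scans by one explicit single-pass loop with early exit on "lost" (same results; objective: alternative decomposition).


-- ===== PORT A =====
def resolve_parlay_from_legs (leg_results : List String) : String :=
  if leg_results = [] then "lost"
  else
    let has_loss := leg_results.contains "lost"
    let has_push := leg_results.contains "push"
    let all_won := leg_results.all (fun r => r == "won")
    if has_loss then "lost"
    else if all_won then "won"
    else if has_push then "push"
    else "lost"

-- ===== PORT B =====
-- the explicit for-loop of Source B, with early return on "lost"
def resolve_parlay_loop : List String → Bool → Bool → String
  | [], saw_push, all_won =>
    if all_won then "won" else if saw_push then "push" else "lost"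
  | r :: rest, saw_push, all_won =>
    if r == "lost" then "lost"
    else resolve_parlay_loop rest (if r == "push" then true else saw_push)
           (if r != "won" then false else all_won)

def resolve_parlay_from_legs_alt (leg_results : List String) : String :=
  if leg_results = [] then "lost"
  else resolve_parlay_loop leg_results false true

-- ===== PRECONDITION & SPEC =====
def Spec_resolve_parlay_from_legs (leg_results : List String) (out : String) : Prop := out = resolve_parlay_from_legs_alt leg_results
instance (leg_results : List String) (out : String) : Decidable (Spec_resolve_parlay_from_legs leg_results out) := by unfold Spec_resolve_parlay_from_legs; infer_instance

-- ===== CLAIM (what is proved, stated in full; the proofs are below) =====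
def Claim_equal_resolve_parlay_from_legs : Prop := ∀ (leg_results : List String), Dom_resolve_parlay_from_legs leg_results → Spec_resolve_parlay_from_legs leg_results (resolve_parlay_from_legs leg_results)

-- ===== LEMMAS AND PROOFS =====
theorem resolve_parlay_loop_eq (l : List String) : ∀ (sp aw : Bool),
    resolve_parlay_loop l sp aw =
      if l.contains "lost" then "lost"
      else if aw && l.all (fun r => r == "won") then "won"
      else if sp || l.contains "push" then "push"
      else "lost" := by
  induction l with
  | nil => intro sp aw; cases aw <;> cases sp <;> simp [resolve_parlay_loop]
  | cons r rest ih =>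
    intro sp aw
    simp only [resolve_parlay_loop, List.contains_cons, List.all_cons]
    by_cases h1 : r = "lost"
    · simp [h1]
    · by_cases h2 : r = "push"
      · subst h2
        simp [h1, ih]
      · by_cases h3 : r = "won"
        · subst h3; simp [h1, ih]
        · simp [h1, h2, h3, ih]
          cases rest.contains "lost" <;> cases sp <;> cases rest.contains "push" <;> simp [Ne.symm h1, Ne.symm h2]

-- ===== VERDICT (by name: the statement is the Claim_ definition above) =====
theorem resolve_parlay_from_legs_spec : Claim_equal_resolve_parlay_from_legs := by
  intro l _
  unfold Spec_resolve_parlay_from_legs resolve_parlay_from_legs resolve_parlay_from_legs_alt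
  by_cases h : l = []
  · simp [h]
  · simp [h, resolve_parlay_loop_eq]
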